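-- pv_equiv track=rewrite | github.com/cepxuozab/YandexTrainingAlgorithms | Training9/Блок 3 Префиксные суммы и два указателя/3.1 Префиксные суммы/E. Сумма тройных произведений/task.py | count_triple_products
-- ===== SOURCE A (Python) =====
-- from itertools import accumulate
--
-- def count_triple_products(arr: list[int], mod: int) -> int:
--     """
--     Вычисляет сумму a[i] * a[j] * a[k] для всех троек индексов, где i < j < k.
--
--     Алгоритм: для каждого j как среднего элемента считаем
--     a[j] * (сумма слева от j) * (сумма справа от j).
--     Сложность: O(n) по времени, O(n) по памяти.
--     """
--     n = len(arr)
--     if n < 3: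
--         return 0
--
--     # Префиксные суммы с модульной арифметикой
--     prefix: list[int] = list(accumulate(arr, lambda x, y: (x + y) % mod))
--     total_sum = prefix[-1]
--
--     result = 0
--     for j in range(1, n - 1):
--         left_sum = prefix[j - 1]
--         # В Python % всегда возвращает неотрицательное число, +MOD не нужен
--         right_sum = (total_sum - prefix[j]) % mod
--         # Цепочка модулей предотвращает переполнение (хотя в Python это не критично)
--         contribution = arr[j] * left_sum % mod * right_sum % mod
--         result = (result + contribution) % mod
--
--     return result
-- ===== SOURCE B (Python) =====
-- def count_triple_products(arr: list[int], mod: int) -> int: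
--     # One pass over arr maintaining running elementary symmetric sums (mod):
--     # e1 = sum of single elements, e2 = sum of pairwise products (i<j),
--     # e3 = sum of triple products (i<j<k).  No prefix array, no n<3 guard.
--     e1 = e2 = e3 = 0
--     for a in arr:
--         e3 = (e3 + e2 * a) % mod
--         e2 = (e2 + e1 * a) % mod
--         e1 = (e1 + a) % mod
--     return e3
-- ===== Notes on version B (the rewrite author's own statement) =====
-- stated objective: faster
-- what changed: Replaces the prefix-sum array and the middle-element (left-sum * a[j] * right-sum) pass with a single left-to-right sweep maintaining the three running elementary symmetric sums e1, e2, e3 mod m, returning e3; no prefix list is allocated and no n<3 guard is needed.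
-- outside the precondition, e.g. on count_triple_products([1], 0): A returns 0, B raises ZeroDivisionError
import Mathlib
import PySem

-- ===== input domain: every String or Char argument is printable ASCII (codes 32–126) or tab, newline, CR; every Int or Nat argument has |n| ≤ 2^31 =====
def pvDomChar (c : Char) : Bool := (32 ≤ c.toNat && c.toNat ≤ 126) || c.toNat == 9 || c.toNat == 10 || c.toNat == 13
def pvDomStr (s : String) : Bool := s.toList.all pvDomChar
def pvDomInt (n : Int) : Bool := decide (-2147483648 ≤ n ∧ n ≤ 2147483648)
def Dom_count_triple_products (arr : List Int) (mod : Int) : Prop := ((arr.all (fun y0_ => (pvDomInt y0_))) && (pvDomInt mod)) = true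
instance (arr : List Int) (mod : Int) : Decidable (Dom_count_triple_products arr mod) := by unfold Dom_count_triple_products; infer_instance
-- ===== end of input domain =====

-- B replaces A's prefix-sum array + middle-element pass by a single sweep keeping the three
-- running elementary symmetric sums mod m (objective: simpler, O(1) extra space).

-- ===== PORT A =====
-- itertools.accumulate(arr, lambda x, y: (x + y) % mod): first element kept as-is,
-- then each next running value is (acc + y) % mod  (exact transliteration).
def pyAccAux (m acc : Int) : List Int → List Int
  | [] => []
  | y :: ys => PySem.Int.mod (acc + y) m :: pyAccAux m (PySem.Int.mod (acc + y) m) ys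

def pyAccumulate (m : Int) : List Int → List Int
  | [] => []
  | x :: xs => x :: pyAccAux m x xs

-- all indices below are in range when n ≥ 3, so pyGetD is exact here
def count_triple_products (arr : List Int) (mod : Int) : Int :=
  let n : Int := PySem.List.len arr
  if n < 3 then 0
  else
    let prefix_ := pyAccumulate mod arr
    let total_sum := PySem.List.pyGetD prefix_ (-1) 0
    (PySem.List.pyRange 1 (n - 1) 1).foldl (fun result j =>
      let left_sum := PySem.List.pyGetD prefix_ (j - 1) 0
      let right_sum := PySem.Int.mod (total_sum - PySem.List.pyGetD prefix_ j 0) mod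
      let contribution := PySem.Int.mod (PySem.Int.mod (PySem.List.pyGetD arr j 0 * left_sum) mod * right_sum) mod
      PySem.Int.mod (result + contribution) mod) 0

-- ===== PORT B =====
def count_triple_products_alt (arr : List Int) (mod : Int) : Int :=
  (arr.foldl (fun (e : Int × Int × Int) a =>
      (PySem.Int.mod (e.1 + a) mod,
       PySem.Int.mod (e.2.1 + e.1 * a) mod,
       PySem.Int.mod (e.2.2 + e.2.1 * a) mod)) (0, 0, 0)).2.2

-- ===== PRECONDITION & SPEC =====
-- Pre_ excludes mod = 0: A raises ZeroDivisionError whenever len(arr) ≥ 3, and B's uniform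
-- pass raises on any nonempty arr; A returns 0 for mod = 0 only via its n < 3 early exit.
def Pre_count_triple_products (arr : List Int) (mod : Int) : Prop := mod ≠ 0
instance (arr : List Int) (mod : Int) : Decidable (Pre_count_triple_products arr mod) := by unfold Pre_count_triple_products; infer_instance
def pvWitness_count_triple_products : List Int × Int := ([1, 2, 3, 4], 7)

def Spec_count_triple_products (arr : List Int) (mod : Int) (out : Int) : Prop := out = count_triple_products_alt arr mod
instance (arr : List Int) (mod : Int) (out : Int) : Decidable (Spec_count_triple_products arr mod out) := by unfold Spec_count_triple_products; infer_instance

-- ===== CLAIM (what is proved, stated in full; the proofs are below) =====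
def Claim_equal_count_triple_products : Prop := ∀ (arr : List Int) (mod : Int), Dom_count_triple_products arr mod → Pre_count_triple_products arr mod → Spec_count_triple_products arr mod (count_triple_products arr mod)

-- ===== LEMMAS AND PROOFS =====

-- sum of pairwise products a[i]*a[j], i < j
def pvT2 : List Int → Int
  | [] => 0
  | a :: l => a * l.sum + pvT2 l

-- sum of triple products a[i]*a[j]*a[k], i < j < k
def pvT3 : List Int → Int
  | [] => 0
  | a :: l => a * pvT2 l + pvT3 l

-- middle-element sum: Σ_j a_j * (pre + sum before j) * (sum after j)
def pvMsum (e1 : Int) : List Int → Int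
  | [] => 0
  | a :: l => a * e1 * l.sum + pvMsum (e1 + a) l

lemma pvmod_sub_dvd (m x : Int) : m ∣ (PySem.Int.mod x m - x) := by
  refine ⟨-(PySem.Int.floordiv x m), ?_⟩
  have h := PySem.Int.floordiv_mul_add_mod x m
  linarith

lemma pvmod_zero (m : Int) : PySem.Int.mod 0 m = 0 :=
  (PySem.Int.mod_eq_zero_iff_dvd 0 m).mpr (dvd_zero m)

lemma pvmod_eq_of_dvd {m x y : Int} (hm : m ≠ 0) (h : m ∣ x - y) :
    PySem.Int.mod x m = PySem.Int.mod y m := by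
  have hx := pvmod_sub_dvd m x
  have hy := pvmod_sub_dvd m y
  have hd : m ∣ (PySem.Int.mod x m - PySem.Int.mod y m) := by
    have e : PySem.Int.mod x m - PySem.Int.mod y m =
        (PySem.Int.mod x m - x) - (PySem.Int.mod y m - y) + (x - y) := by ring
    rw [e]; exact dvd_add (dvd_sub hx hy) h
  have habs : |m| ∣ (PySem.Int.mod x m - PySem.Int.mod y m) := (abs_dvd _ _).mpr hd
  have hlt : |PySem.Int.mod x m - PySem.Int.mod y m| < |m| := by
    rcases lt_or_gt_of_ne hm with hneg | hpos
    · have b1 := PySem.Int.mod_neg_bounds x hneg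
      have b2 := PySem.Int.mod_neg_bounds y hneg
      rw [abs_of_neg hneg, abs_lt]; omega
    · have b1 := PySem.Int.mod_nonneg x hpos
      have b2 := PySem.Int.mod_nonneg y hpos
      have c1 := PySem.Int.mod_lt x hpos
      have c2 := PySem.Int.mod_lt y hpos
      rw [abs_of_pos hpos, abs_lt]; omega
  have := Int.eq_zero_of_abs_lt_dvd habs hlt
  linarith

lemma pvmod_add {m : Int} (hm : m ≠ 0) (x y : Int) :
    PySem.Int.mod (PySem.Int.mod x m + y) m = PySem.Int.mod (x + y) m := by
  apply pvmod_eq_of_dvd hm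
  have h := pvmod_sub_dvd m x
  have e : PySem.Int.mod x m + y - (x + y) = PySem.Int.mod x m - x := by ring
  rw [e]; exact h

lemma pvmod_add_mul {m : Int} (hm : m ≠ 0) (x y v : Int) :
    PySem.Int.mod (x + PySem.Int.mod y m * v) m = PySem.Int.mod (x + y * v) m := by
  apply pvmod_eq_of_dvd hm
  have h := (pvmod_sub_dvd m y).mul_right v
  have e : x + PySem.Int.mod y m * v - (x + y * v) = (PySem.Int.mod y m - y) * v := by ring
  rw [e]; exact h

lemma pvdvd_mul_sub {m x x' y y' : Int} (h1 : m ∣ x - x') (h2 : m ∣ y - y') :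
    m ∣ x * y - x' * y' := by
  have e : x * y - x' * y' = (x - x') * y + x' * (y - y') := by ring
  rw [e]; exact dvd_add (h1.mul_right y) (h2.mul_left x')

lemma pvB_fold (m : Int) (hm : m ≠ 0) (l : List Int) : ∀ (f1 f2 f3 : Int),
    l.foldl (fun (e : Int × Int × Int) a =>
      (PySem.Int.mod (e.1 + a) m,
       PySem.Int.mod (e.2.1 + e.1 * a) m,
       PySem.Int.mod (e.2.2 + e.2.1 * a) m))
      (PySem.Int.mod f1 m, PySem.Int.mod f2 m, PySem.Int.mod f3 m) =
    (PySem.Int.mod (f1 + l.sum) m,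
     PySem.Int.mod (f2 + f1 * l.sum + pvT2 l) m,
     PySem.Int.mod (f3 + f2 * l.sum + f1 * pvT2 l + pvT3 l) m) := by
  induction l with
  | nil => intro f1 f2 f3; simp [pvT2, pvT3]
  | cons a l ih =>
    intro f1 f2 f3
    simp only [List.foldl_cons]
    have c1 : PySem.Int.mod (PySem.Int.mod f1 m + a) m = PySem.Int.mod (f1 + a) m :=
      pvmod_add hm f1 a
    have c2 : PySem.Int.mod (PySem.Int.mod f2 m + PySem.Int.mod f1 m * a) m
        = PySem.Int.mod (f2 + f1 * a) m := by
      rw [pvmod_add hm f2, pvmod_add_mul hm f2 f1 a]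
    have c3 : PySem.Int.mod (PySem.Int.mod f3 m + PySem.Int.mod f2 m * a) m
        = PySem.Int.mod (f3 + f2 * a) m := by
      rw [pvmod_add hm f3, pvmod_add_mul hm f3 f2 a]
    rw [c1, c2, c3, ih (f1 + a) (f2 + f1 * a) (f3 + f2 * a)]
    simp only [List.sum_cons, pvT2, pvT3, Prod.mk.injEq]
    refine ⟨?_, ?_, ?_⟩ <;> · congr 1; ring

lemma pvB_eq (arr : List Int) (m : Int) (hm : m ≠ 0) :
    count_triple_products_alt arr m = PySem.Int.mod (pvT3 arr) m := by
  unfold count_triple_products_alt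
  rw [show ((0, 0, 0) : Int × Int × Int)
      = (PySem.Int.mod 0 m, PySem.Int.mod 0 m, PySem.Int.mod 0 m) by rw [pvmod_zero]]
  rw [pvB_fold m hm arr 0 0 0]
  norm_num

lemma pvAccAux_length (m : Int) : ∀ (l : List Int) (acc : Int), (pyAccAux m acc l).length = l.length := by
  intro l; induction l with
  | nil => intro acc; rfl
  | cons y ys ih => intro acc; simp [pyAccAux, ih]

lemma pvAcc_length (m : Int) (l : List Int) : (pyAccumulate m l).length = l.length := by
  cases l with
  | nil => rfl
  | cons x xs => simp [pyAccumulate, pvAccAux_length]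

lemma pvAccAux_get (m : Int) : ∀ (l : List Int) (acc c : Int), m ∣ (acc - c) →
    ∀ k (hk : k < l.length),
    m ∣ ((pyAccAux m acc l)[k]'(by rw [pvAccAux_length]; exact hk) - (c + (l.take (k + 1)).sum)) := by
  intro l
  induction l with
  | nil => intro acc c _ k hk; simp at hk
  | cons y ys ih =>
    intro acc c hacc k hk
    cases k with
    | zero =>
      simp only [pyAccAux, List.getElem_cons_zero, List.take_succ_cons, List.take_zero,
        List.sum_cons, List.sum_nil, add_zero]
      have h1 := pvmod_sub_dvd m (acc + y)
      have e : PySem.Int.mod (acc + y) m - (c + y)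
          = (PySem.Int.mod (acc + y) m - (acc + y)) + (acc - c) := by ring
      rw [e]; exact dvd_add h1 hacc
    | succ k =>
      simp only [pyAccAux, List.getElem_cons_succ, List.take_succ_cons, List.sum_cons]
      have hacc' : m ∣ (PySem.Int.mod (acc + y) m - (c + y)) := by
        have h1 := pvmod_sub_dvd m (acc + y)
        have e : PySem.Int.mod (acc + y) m - (c + y)
            = (PySem.Int.mod (acc + y) m - (acc + y)) + (acc - c) := by ring
        rw [e]; exact dvd_add h1 hacc
      have := ih (PySem.Int.mod (acc + y) m) (c + y) hacc' k (by simpa using hk)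
      have e : c + (y + (ys.take (k + 1)).sum) = (c + y) + (ys.take (k + 1)).sum := by ring
      rw [e]; exact this

lemma pvAcc_get (m : Int) : ∀ (l : List Int) (k : Nat) (hk : k < l.length),
    m ∣ ((pyAccumulate m l)[k]'(by rw [pvAcc_length]; exact hk) - (l.take (k + 1)).sum) := by
  intro l
  cases l with
  | nil => intro k hk; simp at hk
  | cons x xs =>
    intro k hk
    cases k with
    | zero => simp [pyAccumulate]
    | succ k =>
      simp only [pyAccumulate, List.getElem_cons_succ, List.take_succ_cons, List.sum_cons]
      have := pvAccAux_get m xs x x (by simp) k (by simpa using hk)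
      have e : x + (xs.take (k + 1)).sum = x + (xs.take (k + 1)).sum := rfl
      exact this

lemma pvfold_mod (m : Int) (hm : m ≠ 0) (c c' : Int → Int) :
    ∀ (L : List Int) (s : Int), (∀ j ∈ L, m ∣ (c j - c' j)) →
    L.foldl (fun r j => PySem.Int.mod (r + c j) m) (PySem.Int.mod s m) =
      PySem.Int.mod (s + (L.map c').sum) m := by
  intro L
  induction L with
  | nil => intro s _; simp
  | cons j L ih =>
    intro s h
    simp only [List.foldl_cons, List.map_cons, List.sum_cons]
    have h1 : PySem.Int.mod (PySem.Int.mod s m + c j) m = PySem.Int.mod (s + c' j) m := by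
      rw [pvmod_add hm]
      exact pvmod_eq_of_dvd hm (by
        have e : s + c j - (s + c' j) = c j - c' j := by ring
        rw [e]; exact h j (List.mem_cons_self))
    rw [h1, ih (s + c' j) (fun x hx => h x (List.mem_cons_of_mem j hx))]
    congr 1; ring

lemma pvGetD_append (pre : List Int) (y : Int) (ys : List Int) (d : Int) :
    PySem.List.pyGetD (pre ++ y :: ys) (pre.length : Int) d = y := by
  simp [PySem.List.pyGetD]

-- the exact (integer-valued) contribution of middle index j in arr
def pvC' (arr : List Int) (j : Int) : Int :=
  PySem.List.pyGetD arr j 0 * ((arr.take j.toNat).sum) * (arr.sum - ((arr.take (j.toNat + 1)).sum))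

lemma pvrange_sum : ∀ (v u : List Int),
    ((PySem.List.pyRange (u.length : Int) ((u ++ v).length : Int) 1).map
      (pvC' (u ++ v))).sum = pvMsum u.sum v := by
  intro v
  induction v with
  | nil =>
    intro u
    rw [PySem.List.pyRange_one_eq_nil (by simp)]
    simp [pvMsum]
  | cons a w ih =>
    intro u
    have hcons : PySem.List.pyRange (u.length : Int) ((u ++ a :: w).length : Int) 1
        = (u.length : Int) :: PySem.List.pyRange ((u.length : Int) + 1) ((u ++ a :: w).length : Int) 1 := by
      apply PySem.List.pyRange_one_cons
      simp only [List.length_append, List.length_cons]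
      push_cast; omega
    rw [hcons, List.map_cons, List.sum_cons]
    simp only [pvC']
    -- the head term
    have hget : PySem.List.pyGetD (u ++ a :: w) ((u.length : Int)) 0 = a := pvGetD_append u a w 0
    have htake1 : (u ++ a :: w).take ((u.length : Int)).toNat = u := by
      simp
    have htake2 : (u ++ a :: w).take (((u.length : Int)).toNat + 1) = u ++ [a] := by
      rw [show u ++ a :: w = (u ++ [a]) ++ w from by simp,
          show ((u.length : Int)).toNat + 1 = (u ++ [a]).length from by simp]
      exact List.take_left
    -- the tail via ih at u ++ [a]
    have ih' := ih (u ++ [a])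
    have e1 : (((u ++ [a]).length : Int)) = (u.length : Int) + 1 := by simp
    have e2 : (u ++ [a]) ++ w = u ++ a :: w := by simp
    rw [e1, e2] at ih'
    rw [ih', hget, htake1, htake2]
    simp only [pvMsum, List.sum_append, List.sum_cons, List.sum_nil, add_zero]
    ring

lemma pvMsum_eq : ∀ (l : List Int) (e1 : Int), pvMsum e1 l = pvT3 l + e1 * pvT2 l := by
  intro l; induction l with
  | nil => intro e1; simp [pvMsum, pvT3, pvT2]
  | cons a l ih => intro e1; simp only [pvMsum, pvT3, pvT2, ih]; ring

lemma pvfold_mod0 (m : Int) (hm : m ≠ 0) (c c' : Int → Int) (L : List Int)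
    (h : ∀ j ∈ L, m ∣ (c j - c' j)) :
    L.foldl (fun r j => PySem.Int.mod (r + c j) m) 0 =
      PySem.Int.mod ((L.map c').sum) m := by
  have := pvfold_mod m hm c c' L 0 h
  rw [pvmod_zero] at this
  simpa using this

lemma pvT3_small (arr : List Int) (h : arr.length < 3) : pvT3 arr = 0 := by
  rcases arr with _ | ⟨a, _ | ⟨b, _ | ⟨c, t⟩⟩⟩
  · rfl
  · simp [pvT3, pvT2]
  · simp [pvT3, pvT2]
  · simp only [List.length_cons] at h; omega

lemma pvA_eq (arr : List Int) (m : Int) (hm : m ≠ 0) :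
    count_triple_products arr m = PySem.Int.mod (pvT3 arr) m := by
  by_cases hsm : arr.length < 3
  · unfold count_triple_products
    rw [if_pos (by simp only [PySem.List.len_eq]; exact_mod_cast hsm)]
    rw [pvT3_small arr hsm, pvmod_zero]
  · simp only [count_triple_products, PySem.List.len_eq]
    rw [if_neg (by omega)]
    set pre := pyAccumulate m arr with hpre
    have hlen : pre.length = arr.length := pvAcc_length m arr
    have hne : pre ≠ [] := by
      intro h0; rw [h0] at hlen; simp at hlen; omega
    have htotal : PySem.List.pyGetD pre (-1) 0 = pre[arr.length - 1]'(by omega) := by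
      rw [PySem.List.pyGetD_neg_one pre 0 hne, List.getLast_eq_getElem]
      simp only [hlen]
    have dT : m ∣ (pre[arr.length - 1]'(by omega) - arr.sum) := by
      have h2 := pvAcc_get m arr (arr.length - 1) (by omega)
      rw [show arr.length - 1 + 1 = arr.length from by omega, List.take_length] at h2
      exact h2
    have hdvd : ∀ j ∈ PySem.List.pyRange 1 ((arr.length : Int) - 1),
        m ∣ ((fun j => PySem.Int.mod (PySem.Int.mod
              (PySem.List.pyGetD arr j 0 * PySem.List.pyGetD pre (j - 1) 0) m *
              PySem.Int.mod (PySem.List.pyGetD pre (-1) 0 - PySem.List.pyGetD pre j 0) m) m) j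
            - pvC' arr j) := by
      intro j hj
      rw [PySem.List.mem_pyRange_one] at hj
      obtain ⟨hj1, hj2⟩ := hj
      have hjn : j < (arr.length : Int) - 1 := hj2
      have hleft : PySem.List.pyGetD pre (j - 1) 0 = pre[(j - 1).toNat]'(by omega) := by
        apply PySem.List.pyGetD_eq_getElem pre 0 (by omega)
        rw [hlen]; omega
      have hmid : PySem.List.pyGetD pre j 0 = pre[j.toNat]'(by omega) := by
        apply PySem.List.pyGetD_eq_getElem pre 0 (by omega)
        rw [hlen]; omega
      have dL : m ∣ (pre[(j - 1).toNat]'(by omega) - (arr.take j.toNat).sum) := by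
        have h1 : (j - 1).toNat < arr.length := by omega
        have h2 := pvAcc_get m arr (j - 1).toNat h1
        have e1 : (j - 1).toNat + 1 = j.toNat := by omega
        rw [e1] at h2
        exact h2
      have dP : m ∣ (pre[j.toNat]'(by omega) - (arr.take (j.toNat + 1)).sum) := by
        have h1 : j.toNat < arr.length := by omega
        exact pvAcc_get m arr j.toNat h1
      simp only [htotal, hleft, hmid, pvC']
      set aj := PySem.List.pyGetD arr j 0 with haj
      set L := pre[(j - 1).toNat]'(by omega) with hL
      set P := pre[j.toNat]'(by omega) with hP
      set T := pre[arr.length - 1]'(by omega) with hT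
      set Lt := (arr.take j.toNat).sum with hLt
      set Pt := (arr.take (j.toNat + 1)).sum with hPt
      set S := arr.sum with hS
      have d1 := pvmod_sub_dvd m (PySem.Int.mod (aj * L) m * PySem.Int.mod (T - P) m)
      have d2 := pvmod_sub_dvd m (aj * L)
      have d3 := pvmod_sub_dvd m (T - P)
      have dX : m ∣ (PySem.Int.mod (aj * L) m * PySem.Int.mod (T - P) m - (aj * L) * (T - P)) :=
        pvdvd_mul_sub d2 d3
      have d4 : m ∣ (aj * L - aj * Lt) := by
        have e : aj * L - aj * Lt = aj * (L - Lt) := by ring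
        rw [e]; exact dL.mul_left aj
      have d5 : m ∣ ((T - P) - (S - Pt)) := by
        have e : (T - P) - (S - Pt) = (T - S) - (P - Pt) := by ring
        rw [e]; exact dvd_sub dT dP
      have dY : m ∣ ((aj * L) * (T - P) - aj * Lt * (S - Pt)) := by
        have := pvdvd_mul_sub d4 d5
        have e : aj * L * (T - P) - aj * Lt * (S - Pt)
            = (aj * L) * (T - P) - (aj * Lt) * (S - Pt) := by ring
        rw [e]; exact this
      have e : PySem.Int.mod (PySem.Int.mod (aj * L) m * PySem.Int.mod (T - P) m) m
            - aj * Lt * (S - Pt)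
          = (PySem.Int.mod (PySem.Int.mod (aj * L) m * PySem.Int.mod (T - P) m) m
              - PySem.Int.mod (aj * L) m * PySem.Int.mod (T - P) m)
            + (PySem.Int.mod (aj * L) m * PySem.Int.mod (T - P) m - (aj * L) * (T - P))
            + ((aj * L) * (T - P) - aj * Lt * (S - Pt)) := by ring
      rw [e]
      exact dvd_add (dvd_add d1 dX) dY
    rw [pvfold_mod0 m hm _ (pvC' arr) _ hdvd]
    -- now relate the range sum to pvT3
    have h0 : PySem.List.pyRange 0 ((arr.length : Int))
        = 0 :: PySem.List.pyRange 1 ((arr.length : Int)) := by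
      have := PySem.List.pyRange_one_cons (a := 0) (b := (arr.length : Int)) (by omega)
      simpa using this
    have h1 : PySem.List.pyRange 1 ((arr.length : Int))
        = PySem.List.pyRange 1 ((arr.length : Int) - 1) ++ [(arr.length : Int) - 1] := by
      have := PySem.List.pyRange_one_succ_right (a := 1) (b := (arr.length : Int) - 1) (by omega)
      rw [show ((arr.length : Int) - 1 + 1) = (arr.length : Int) from by ring] at this
      exact this
    have hfull := pvrange_sum arr []
    simp only [List.nil_append, List.length_nil, Nat.cast_zero, List.sum_nil] at hfull
    rw [h0, h1] at hfull
    simp only [List.map_cons, List.map_append, List.sum_cons, List.sum_append,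
      List.map_nil, List.sum_nil, add_zero] at hfull
    have hC0 : pvC' arr 0 = 0 := by simp [pvC']
    have hClast : pvC' arr ((arr.length : Int) - 1) = 0 := by
      have ht : ((arr.length : Int) - 1).toNat + 1 = arr.length := by omega
      simp only [pvC', ht, List.take_length, sub_self, mul_zero]
    rw [hC0, hClast, pvMsum_eq] at hfull
    simp only [zero_add, zero_mul, add_zero] at hfull
    rw [hfull]

-- ===== VERDICT (by name: the statement is the Claim_ definition above) =====
theorem count_triple_products_spec : Claim_equal_count_triple_products := by
  intro arr m _ hm
  unfold Spec_count_triple_products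
  rw [pvA_eq arr m hm, pvB_eq arr m hm]
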